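-- pv_equiv track=rewrite | github.com/MustafaEP/moodweave | apps/ai/app/emotion.py | has_local_negation
-- ===== SOURCE A (Python) =====
-- WINDOW = 3 # Kaç kelime yakına bakılacak
--
-- NEGATIONS = ["değil", "degil", "not", "isn't", "aren't", "don't", "cant", "can't"]
--
-- def has_local_negation(text: str, target_word: list[str]) -> bool:
--     tokens = text.lower().split()
--     for i, tok in enumerate(tokens):
--         for w in target_word:
--             if w in tok:
--                 start = max(0, i - WINDOW)
--                 end = min(len(tokens), i + WINDOW + 1)
--                 window = tokens[start:end]
--                 if any(n in window for n in NEGATIONS):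
--                     return True
--     return False
-- ===== SOURCE B (Python) =====
-- WINDOW = 3
--
-- NEGATIONS = ["değil", "degil", "not", "isn't", "aren't", "don't", "cant", "can't"]
--
-- def has_local_negation(text: str, target_word: list[str]) -> bool:
--     tokens = text.lower().split()
--     # one pass: collect the positions of exact negation tokens
--     neg_pos = [j for j, t in enumerate(tokens) if t in NEGATIONS]
--     # second pass: any token containing a target with a negation position within WINDOW
--     return any(
--         any(abs(j - i) <= WINDOW for j in neg_pos)
--         for i, tok in enumerate(tokens)
--         if any(w in tok for w in target_word)
--     )
-- ===== Notes on version B (the rewrite author's own statement) =====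
-- stated objective: faster
-- what changed: B precomputes the list of negation-token positions in one pass and then tests each target-containing token once by index distance (|j-i| <= WINDOW), instead of re-slicing a window of the token list and scanning it against all negations for every (token, matching target) pair.
import Mathlib
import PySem

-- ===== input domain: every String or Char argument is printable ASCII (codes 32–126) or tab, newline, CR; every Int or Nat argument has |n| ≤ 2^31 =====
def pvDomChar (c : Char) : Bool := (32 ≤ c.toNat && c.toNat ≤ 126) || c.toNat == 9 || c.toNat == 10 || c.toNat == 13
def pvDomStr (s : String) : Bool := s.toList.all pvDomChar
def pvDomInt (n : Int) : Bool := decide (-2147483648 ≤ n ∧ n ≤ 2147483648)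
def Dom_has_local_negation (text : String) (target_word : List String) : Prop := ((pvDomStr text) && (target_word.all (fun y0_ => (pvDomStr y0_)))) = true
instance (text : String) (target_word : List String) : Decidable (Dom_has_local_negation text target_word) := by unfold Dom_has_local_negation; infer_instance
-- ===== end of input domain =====

-- B precomputes the negation-token positions once and tests each target-containing token
-- by index distance, instead of re-slicing and scanning a window per match (objective: alternative).

def pvNEGATIONS : List String := ["değil", "degil", "not", "isn't", "aren't", "don't", "cant", "can't"]

-- ===== PORT A =====
def has_local_negation (text : String) (target_word : List String) : Bool :=
  let tokens := PySem.Str.split₀ (PySem.Str.lower text)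
  (PySem.List.enumerate tokens).any fun it =>
    target_word.any fun w =>
      PySem.Str.isIn w it.2 &&
      (let start : Int := max 0 (it.1 - 3)
       let stop : Int := min (tokens.length : Int) (it.1 + 3 + 1)
       let window := PySem.List.slice tokens (some start) (some stop)
       pvNEGATIONS.any fun n => window.contains n)

-- ===== PORT B =====
def has_local_negation_alt (text : String) (target_word : List String) : Bool :=
  let tokens := PySem.Str.split₀ (PySem.Str.lower text)
  let negPos := (PySem.List.enumerate tokens).filterMap
    (fun jt => if pvNEGATIONS.contains jt.2 then some jt.1 else none)
  (PySem.List.enumerate tokens).any fun it =>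
    (target_word.any fun w => PySem.Str.isIn w it.2) &&
    negPos.any fun j => (j - it.1).natAbs ≤ 3

-- ===== PRECONDITION & SPEC =====
def Spec_has_local_negation (text : String) (target_word : List String) (out : Bool) : Prop := out = has_local_negation_alt text target_word
instance (text : String) (target_word : List String) (out : Bool) : Decidable (Spec_has_local_negation text target_word out) := by unfold Spec_has_local_negation; infer_instance

-- ===== CLAIM (what is proved, stated in full; the proofs are below) =====
def Claim_equal_has_local_negation : Prop := ∀ (text : String) (target_word : List String), Dom_has_local_negation text target_word → Spec_has_local_negation text target_word (has_local_negation text target_word)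

-- ===== LEMMAS AND PROOFS =====

lemma mem_take_drop {α : Type} (xs : List α) (a m : Nat) (x : α) :
    x ∈ (xs.drop a).take m ↔ ∃ j, a ≤ j ∧ j < a + m ∧ ∃ h : j < xs.length, xs[j] = x := by
  simp only [List.mem_iff_getElem, List.getElem_take, List.getElem_drop, List.length_take,
    List.length_drop, lt_min_iff]
  constructor
  · rintro ⟨k, ⟨hk1, hk2⟩, hkx⟩
    exact ⟨a + k, by omega, by omega, by omega, hkx⟩
  · rintro ⟨j, hja, hjm, hjl, hjx⟩
    refine ⟨j - a, ⟨by omega, by omega⟩, ?_⟩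
    simp only [show a + (j - a) = j from by omega]
    exact hjx

-- A's window scan over tokens[max 0 (i-3) : min len (i+4)] hits a negation iff some
-- negation position j in B's index list satisfies |j - i| ≤ 3, for 0 ≤ i < len.
lemma window_eq_negPos (tokens : List String) (i : Int)
    (h0 : 0 ≤ i) (hlt : i < (tokens.length : Int)) :
    (pvNEGATIONS.any fun n =>
      (PySem.List.slice tokens (some (max 0 (i - 3))) (some (min (tokens.length : Int) (i + 3 + 1)))).contains n)
    = ((PySem.List.enumerate tokens).filterMap
        (fun jt => if pvNEGATIONS.contains jt.2 then some jt.1 else none)).any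
        (fun j => (j - i).natAbs ≤ 3) := by
  rw [PySem.List.slice_toNat tokens (by omega) (by omega), Bool.eq_iff_iff]
  have haI : ((max 0 (i - 3)).toNat : Int) = max 0 (i - 3) := Int.toNat_of_nonneg (by omega)
  have hbI : ((min (tokens.length : Int) (i + 3 + 1)).toNat : Int) = min (tokens.length : Int) (i + 3 + 1) :=
    Int.toNat_of_nonneg (by omega)
  simp only [List.any_eq_true, List.mem_filterMap, List.contains_iff_mem, mem_take_drop,
    decide_eq_true_eq]
  constructor
  · rintro ⟨n, hn, j, hja, hjb, hjl, hjx⟩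
    refine ⟨(j : Int), ⟨(0 + (j : Int), tokens[j]), ?_, ?_⟩, ?_⟩
    · exact (PySem.List.mem_enumerate_iff tokens 0 _).2 ⟨j, hjl, rfl⟩
    · have hmem : tokens[j] ∈ pvNEGATIONS := hjx ▸ hn
      simp [hmem]
    · omega
  · rintro ⟨j, ⟨p, hp, hfp⟩, hdist⟩
    obtain ⟨k, hk, rfl⟩ := (PySem.List.mem_enumerate_iff tokens 0 p).1 hp
    by_cases hmem : tokens[k] ∈ pvNEGATIONS
    · simp only [hmem, if_true, Option.some.injEq] at hfp
      refine ⟨tokens[k], hmem, k, by omega, by omega, hk, rfl⟩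
    · simp [hmem] at hfp

lemma any_and_const {α : Type} (l : List α) (p : α → Bool) (c : Bool) :
    (l.any fun w => p w && c) = (l.any p && c) := by
  induction l with
  | nil => simp
  | cons x xs ih => cases hpx : p x <;> cases c <;> simp_all

-- ===== VERDICT (by name: the statement is the Claim_ definition above) =====
theorem has_local_negation_spec : Claim_equal_has_local_negation := by
  intro text target_word _
  unfold Spec_has_local_negation
  simp only [has_local_negation, has_local_negation_alt]
  generalize PySem.Str.split₀ (PySem.Str.lower text) = tokens
  apply PySem.List.any_congr_mem
  intro it hit
  obtain ⟨k, hk, rfl⟩ := (PySem.List.mem_enumerate_iff _ 0 it).1 hit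
  rw [any_and_const]
  congr 1
  exact window_eq_negPos _ _ (by omega) (by omega)
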